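-- pv_equiv track=rewrite | github.com/henriquea/Codigo-Decripter | reverse.py | OctEncrypt
-- ===== SOURCE A (Python) =====
-- def OctEncrypt(data):
--     key = generateOctKey(data)
--     data = [ord(c) for c in data]
--     encryptedData = ''
--     for i in range(len(data)):
--         val = data[i] - (key[i]*(-1))
--
--         encryptedData += chr(val)
--     return encryptedData
--
-- def generateOctKey(text: str):
--     key = []
--     num = 0
--     for c in text:
--         key.append((11-num))
--         num += 2
--     return key
-- ===== SOURCE B (Python) =====
-- def OctEncrypt(data):
--     # Back-to-front: walk the string in reverse carrying the shift as an
--     # accumulator (no index arithmetic, no key table), then reverse once.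
--     out = []
--     shift = 11 - 2 * (len(data) - 1)  # shift of the LAST character
--     for c in reversed(data):
--         out.append(chr(ord(c) + shift))
--         shift += 2
--     out.reverse()
--     return ''.join(out)
-- ===== Notes on version B (the rewrite author's own statement) =====
-- stated objective: alternative
-- what changed: B drops the key table and index arithmetic entirely: it traverses the string back-to-front carrying the shift as an accumulator (starting at 11-2*(n-1) for the last char, +2 each step), collects into a list and reverses once, instead of A's build-key-list-then-index-scan with string concatenation.
import Mathlib
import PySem

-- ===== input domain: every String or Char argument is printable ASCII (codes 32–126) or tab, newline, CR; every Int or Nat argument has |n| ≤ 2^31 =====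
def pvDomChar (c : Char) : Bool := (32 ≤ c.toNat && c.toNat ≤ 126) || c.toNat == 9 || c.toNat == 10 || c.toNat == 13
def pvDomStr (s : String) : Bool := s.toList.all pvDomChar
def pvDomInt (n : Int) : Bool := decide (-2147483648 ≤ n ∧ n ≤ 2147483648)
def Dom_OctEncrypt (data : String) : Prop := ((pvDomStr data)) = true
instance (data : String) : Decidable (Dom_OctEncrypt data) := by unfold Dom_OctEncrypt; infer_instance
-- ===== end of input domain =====

-- B replaces A's key-table-then-index-scan by a back-to-front pass carrying the shift as an accumulator (objective: alternative).

-- ===== PORT A =====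
-- helper generateOctKey: appends (11 - num) per char, num += 2
def pvGenerateOctKey (text : String) : List Int :=
  (text.toList.foldl (fun (st : List Int × Int) _c => (st.1 ++ [11 - st.2], st.2 + 2)) ([], 0)).1

-- chr(val) is ported as Char.ofNat val.toNat: exact whenever 0 ≤ val, which Pre_ guarantees;
-- on a negative val Python raises ValueError, excluded by Pre_. ord(c) is c.toNat.
def OctEncrypt (data : String) : String :=
  let key := pvGenerateOctKey data
  let dataL := data.toList.map (fun c => (c.toNat : Int))
  let enc := (PySem.List.pyRange 0 (dataL.length : Int) 1).foldl
    (fun acc i =>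
      let val := PySem.List.pyGetD dataL i 0 - (PySem.List.pyGetD key i 0 * (-1))
      acc ++ [Char.ofNat val.toNat]) []
  String.ofList enc

-- ===== PORT B =====
-- back-to-front pass: fold over the reversed characters carrying (out, shift), then reverse out
def OctEncrypt_alt (data : String) : String :=
  let s0 : Int := 11 - 2 * ((data.toList.length : Int) - 1)
  let st := data.toList.reverse.foldl
    (fun (st : List Char × Int) c =>
      (st.1 ++ [Char.ofNat ((c.toNat : Int) + st.2).toNat], st.2 + 2)) ([], s0)
  String.ofList st.1.reverse

-- ===== PRECONDITION & SPEC =====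
-- Pre_ excludes exactly the inputs where chr's argument ord(data[i]) + 11 - 2*i is negative
-- for some position i, on which Python's A (and B) raise ValueError.
def Pre_OctEncrypt (data : String) : Prop :=
  ∀ p ∈ data.toList.zipIdx, 2 * (p.2 : Int) ≤ (p.1.toNat : Int) + 11
instance (data : String) : Decidable (Pre_OctEncrypt data) := by unfold Pre_OctEncrypt; infer_instance
def pvWitness_OctEncrypt : String := "abc"

def Spec_OctEncrypt (data : String) (out : String) : Prop := out = OctEncrypt_alt data
instance (data : String) (out : String) : Decidable (Spec_OctEncrypt data out) := by unfold Spec_OctEncrypt; infer_instance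

-- ===== CLAIM =====
def Claim_equal_OctEncrypt : Prop := ∀ (data : String), Dom_OctEncrypt data → Pre_OctEncrypt data → Spec_OctEncrypt data (OctEncrypt data)

-- ===== LEMMAS AND PROOFS =====

-- generateOctKey's fold, characterized
theorem pvKey_fold (cs : List Char) (acc : List Int) (num : Int) :
    (cs.foldl (fun (st : List Int × Int) _c => (st.1 ++ [11 - st.2], st.2 + 2)) (acc, num)).1
      = acc ++ (List.range cs.length).map (fun k : Nat => 11 - (num + 2 * (k : Int))) := by
  induction cs generalizing acc num with
  | nil => simp
  | cons c cs ih =>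
      rw [List.foldl_cons, ih, List.length_cons, List.range_succ_eq_map,
        List.map_cons, List.map_map, List.append_assoc]
      congr 1
      simp only [List.cons_append, List.nil_append, List.cons.injEq]
      constructor
      · norm_num
      · apply List.map_congr_left
        intro a _
        simp only [Function.comp_apply, Nat.succ_eq_add_one]
        push_cast; ring

theorem pvKey_spec (text : String) :
    pvGenerateOctKey text
      = (List.range text.toList.length).map (fun k : Nat => 11 - 2 * (k : Int)) := by
  unfold pvGenerateOctKey
  rw [pvKey_fold]
  simp only [List.nil_append]
  congr 1; funext k; ring

-- accumulate-by-append fold = map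
theorem pvFoldl_append_map {α β : Type} (l : List α) (g : α → β) (acc : List β) :
    l.foldl (fun acc i => acc ++ [g i]) acc = acc ++ l.map g := by
  induction l generalizing acc with
  | nil => simp
  | cons x xs ih => simp [ih]

-- canonical form of the output: char i is chr(ord(data[i]) + 11 - 2*i)
def pvT (data : String) : List Char :=
  data.toList.zipIdx.map (fun p => Char.ofNat ((p.1.toNat : Int) + (11 - 2 * (p.2 : Int))).toNat)

-- B's fold, characterized: the k-th appended char has shift s + 2k
theorem pvRevFold (cs : List Char) (acc : List Char) (s : Int) :
    (cs.foldl (fun (st : List Char × Int) c =>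
        (st.1 ++ [Char.ofNat ((c.toNat : Int) + st.2).toNat], st.2 + 2)) (acc, s)).1
      = acc ++ cs.zipIdx.map (fun p => Char.ofNat ((p.1.toNat : Int) + (s + 2 * (p.2 : Int))).toNat) := by
  induction cs generalizing acc s with
  | nil => simp
  | cons c cs ih =>
      rw [List.foldl_cons, ih, List.zipIdx_cons, Nat.zero_add, List.zipIdx_succ,
        List.map_cons, List.map_map, List.append_assoc]
      congr 1
      simp only [List.cons_append, List.nil_append, List.cons.injEq]
      constructor
      · norm_num
      · apply List.map_congr_left
        intro p _
        simp only [Function.comp_apply]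
        congr 2
        push_cast; ring

-- A's output list equals the canonical form
theorem pvA_eq (data : String) : OctEncrypt data = String.ofList (pvT data) := by
  unfold OctEncrypt pvT
  simp only
  congr 1
  rw [pvFoldl_append_map]
  simp only [List.nil_append, pvKey_spec]
  apply List.ext_getElem
  · simp [PySem.List.length_pyRange_one]
  · intro k h1 h2
    have hk : k < data.toList.length := by
      simpa [PySem.List.length_pyRange_one] using h1
    simp only [List.getElem_map, PySem.List.getElem_pyRange_one, zero_add,
      PySem.List.pyGetD_natCast, List.getElem_zipIdx]
    have hd : (data.toList.map (fun c => (c.toNat : Int))).getD k 0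
        = ((data.toList[k]'hk).toNat : Int) := by
      rw [List.getD_eq_getElem _ _ (by simpa using hk)]
      simp
    have hkey : ((List.range data.toList.length).map
          (fun k : Nat => 11 - 2 * (k : Int))).getD k 0 = 11 - 2 * (k : Int) := by
      rw [List.getD_eq_getElem _ _ (by simpa using hk)]
      simp
    rw [hd, hkey]
    congr 1
    omega

-- B's output list equals the canonical form
theorem pvB_eq (data : String) : OctEncrypt_alt data = String.ofList (pvT data) := by
  unfold OctEncrypt_alt pvT
  simp only
  congr 1
  rw [pvRevFold]
  simp only [List.nil_append]
  apply List.ext_getElem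
  · simp
  · intro k h1 h2
    have hk : k < data.toList.length := by simpa using h2
    simp only [List.getElem_reverse, List.getElem_map, List.getElem_zipIdx,
      List.length_map, List.length_zipIdx, List.length_reverse, zero_add]
    have h3 : data.toList.length - 1 - (data.toList.length - 1 - k) = k := by omega
    simp only [h3]
    congr 1
    omega

theorem OctEncrypt_spec : Claim_equal_OctEncrypt := by
  intro data _hdom _hpre
  unfold Spec_OctEncrypt
  rw [pvA_eq, pvB_eq]
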